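-- pv_equiv track=rewrite | github.com/trotacodigos/Rubric-MQM | metric/utils/utils.py | preserve_paragraph_structure
-- ===== SOURCE A (Python) =====
-- def preserve_paragraph_structure(src_text, tgt_text):
--     """
--     Reconstructs tgt_text to preserve paragraph and line break structure of src_text.
--     Supports '\n' (line breaks) and '\n\n' (paragraph breaks).
--     """
--     tgt_text = tgt_text.strip("```").strip()
--     source_parts = src_text.split("\n\n")
--     separators = []
--
--     for part in source_parts:
--         lines = part.split("\n")
--         separators.extend(["\n"] * (len(lines) - 1))
--         separators.append("\n\n")
--
--     target_flat = [line for para in tgt_text.split("\n\n") for line in para.split("\n")]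
--
--     rebuilt = ""
--     for sep, line in zip(separators, target_flat):
--         rebuilt += line + sep
--
--     return rebuilt.strip()
-- ===== SOURCE B (Python) =====
-- def preserve_paragraph_structure(src_text, tgt_text):
--     """
--     Reconstructs tgt_text to preserve paragraph and line break structure of src_text.
--     Supports '\n' (line breaks) and '\n\n' (paragraph breaks).
--     """
--     tgt_text = tgt_text.strip("```").strip()
--     flat = [line for para in tgt_text.split("\n\n") for line in para.split("\n")]
--     paragraphs = []
--     pos = 0
--     for part in src_text.split("\n\n"):
--         n = len(part.split("\n"))
--         paragraphs.append("\n".join(flat[pos:pos + n]))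
--         pos += n
--         if pos >= len(flat):
--             break
--     return "\n\n".join(paragraphs).strip()
-- ===== Notes on version B (the rewrite author's own statement) =====
-- stated objective: alternative
-- what changed: B builds no per-line separator list and pairs nothing: it partitions the flattened target lines into chunks sized by each source paragraph's line count, joins each chunk with '\n' and the chunks with '\n\n' (the final strip absorbs A's trailing separator), instead of A's zip of every line with a precomputed separator and repeated string concatenation.
import Mathlib
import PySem

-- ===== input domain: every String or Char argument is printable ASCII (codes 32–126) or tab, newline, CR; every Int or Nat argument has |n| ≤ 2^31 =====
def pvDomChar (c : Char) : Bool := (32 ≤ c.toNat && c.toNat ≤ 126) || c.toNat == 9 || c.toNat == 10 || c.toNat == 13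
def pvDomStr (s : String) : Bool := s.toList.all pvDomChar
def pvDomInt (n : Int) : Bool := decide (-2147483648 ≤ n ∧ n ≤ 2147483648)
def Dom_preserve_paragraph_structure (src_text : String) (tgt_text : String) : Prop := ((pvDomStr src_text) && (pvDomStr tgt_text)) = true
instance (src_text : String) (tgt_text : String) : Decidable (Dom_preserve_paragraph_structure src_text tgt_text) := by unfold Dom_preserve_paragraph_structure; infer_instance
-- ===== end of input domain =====

-- B builds no separator list and pairs nothing: it partitions the flattened target lines into
-- chunks sized by each source paragraph's line count and joins chunks ("\n" inside, "\n\n"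
-- between); the final strip absorbs A's trailing separator (objective: alternative).

-- shared character-list constants for "\n", "\n\n" and "```"
def pvNL : List Char := ['\n']
def pvNN : List Char := ['\n', '\n']
def pvBT : List Char := ['`', '`', '`']

-- ===== PORT A =====
def preserve_paragraph_structure (src_text : String) (tgt_text : String) : String :=
  let tgt := PySem.Chars.strip (PySem.Chars.stripChars tgt_text.toList pvBT)
  let sourceParts := PySem.Chars.splitOn src_text.toList pvNN
  let separators := sourceParts.foldl
      (fun acc part =>
        (acc ++ List.replicate ((PySem.Chars.splitOn part pvNL).length - 1) pvNL) ++ [pvNN]) []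
  let targetFlat := (PySem.Chars.splitOn tgt pvNN).flatMap (fun para => PySem.Chars.splitOn para pvNL)
  let rebuilt := (separators.zip targetFlat).foldl (fun acc p => acc ++ (p.2 ++ p.1)) []
  String.ofList (PySem.Chars.strip rebuilt)

-- ===== PORT B =====
-- Source B's loop over source paragraphs: append the next n-line slice of `flat`
-- joined with "\n", advance, and stop ('break') once all target lines are consumed
def ppsChunks : List (List Char) → List (List Char) → List (List Char)
  | [], _ => []
  | part :: parts, flat =>
      let n := (PySem.Chars.splitOn part pvNL).length
      let chunk := PySem.Chars.join pvNL (flat.take n)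
      if flat.length ≤ n then [chunk] else chunk :: ppsChunks parts (flat.drop n)

def preserve_paragraph_structure_alt (src_text : String) (tgt_text : String) : String :=
  let tgt := PySem.Chars.strip (PySem.Chars.stripChars tgt_text.toList pvBT)
  let flat := (PySem.Chars.splitOn tgt pvNN).flatMap (fun para => PySem.Chars.splitOn para pvNL)
  let paragraphs := ppsChunks (PySem.Chars.splitOn src_text.toList pvNN) flat
  String.ofList (PySem.Chars.strip (PySem.Chars.join pvNN paragraphs))

-- ===== PRECONDITION & SPEC =====
def Spec_preserve_paragraph_structure (src_text : String) (tgt_text : String) (out : String) : Prop := out = preserve_paragraph_structure_alt src_text tgt_text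
instance (src_text : String) (tgt_text : String) (out : String) : Decidable (Spec_preserve_paragraph_structure src_text tgt_text out) := by unfold Spec_preserve_paragraph_structure; infer_instance

-- ===== CLAIM (what is proved, stated in full; the proofs are below) =====
def Claim_equal_preserve_paragraph_structure : Prop := ∀ (src_text : String) (tgt_text : String), Dom_preserve_paragraph_structure src_text tgt_text → Spec_preserve_paragraph_structure src_text tgt_text (preserve_paragraph_structure src_text tgt_text)

-- ===== LEMMAS AND PROOFS =====

-- splitOn never returns the empty list (Python split always yields ≥ 1 piece)
lemma splitOn_go_ne_nil (sep : List Char) :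
    ∀ (fuel : Nat) (l cur : List Char) (acc : List (List Char)),
      PySem.Chars.splitOn.go sep fuel l cur acc ≠ [] := by
  intro fuel
  induction fuel with
  | zero => intro l cur acc; simp [PySem.Chars.splitOn.go]
  | succ n ih =>
      intro l cur acc
      cases l with
      | nil => simp [PySem.Chars.splitOn.go]
      | cons c rest =>
          simp only [PySem.Chars.splitOn.go]
          split_ifs with h
          · exact ih _ _ _
          · exact ih _ _ _

lemma splitOn_ne_nil (s sep : List Char) : PySem.Chars.splitOn s sep ≠ [] :=
  splitOn_go_ne_nil sep _ s [] []

-- zip distributes over append on the left, dropping the consumed prefix on the right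
lemma zip_append_left {α β : Type} (xs ys : List α) (ts : List β) :
    (xs ++ ys).zip ts = xs.zip ts ++ ys.zip (ts.drop xs.length) := by
  induction xs generalizing ts with
  | nil => simp
  | cons x xs ih =>
      cases ts with
      | nil => simp
      | cons t ts => simp [ih]

-- the separator list A builds for one paragraph
def pvSeps (L : List (List Char)) : List (List Char) :=
  List.replicate (L.length - 1) pvNL ++ [pvNN]

lemma pvSeps_length (L : List (List Char)) (hL : L ≠ []) :
    (pvSeps L).length = L.length := by
  have : 0 < L.length := List.length_pos_iff.mpr hL
  simp [pvSeps]
  omega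

-- join with a nonempty tail unfolds one step
lemma join_cons_of_ne (sep a : List Char) (rest : List (List Char)) (h : rest ≠ []) :
    PySem.Chars.join sep (a :: rest) = a ++ sep ++ PySem.Chars.join sep rest := by
  cases rest with
  | nil => exact absurd rfl h
  | cons b rest' => simp [PySem.Chars.join_cons_cons, List.append_assoc]

-- A's zip-and-concatenate for ONE paragraph of k+1 source lines is B's "\n"-join of the
-- first k+1 target lines, plus one trailing separator
lemma seg_spec : ∀ (k : Nat) (ts : List (List Char)), ts ≠ [] →
    ((List.replicate k pvNL ++ [pvNN]).zip ts).flatMap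
        (fun p : List Char × List Char => p.2 ++ p.1)
    = PySem.Chars.join pvNL (ts.take (k + 1)) ++
        (if k + 1 ≤ ts.length then pvNN else pvNL) := by
  intro k
  induction k with
  | zero =>
      intro ts hts
      cases ts with
      | nil => exact absurd rfl hts
      | cons t ts' => simp [PySem.Chars.join, List.intercalate]
  | succ k ih =>
      intro ts hts
      cases ts with
      | nil => exact absurd rfl hts
      | cons t ts' =>
          cases ts' with
          | nil => simp [PySem.Chars.join, List.intercalate, List.replicate_succ]
          | cons u us =>
              have h1 : (List.replicate (k+1) pvNL ++ [pvNN]).zip (t :: u :: us)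
                  = (pvNL, t) :: ((List.replicate k pvNL ++ [pvNN]).zip (u :: us)) := by
                simp [List.replicate_succ]
              rw [h1, List.flatMap_cons, ih (u :: us) (by simp)]
              have hlen : (k + 1 + 1 ≤ (t :: u :: us).length) = (k + 1 ≤ (u :: us).length) := by
                simp
              simp only [List.take_succ_cons, hlen]
              rw [PySem.Chars.join_cons_cons]
              simp [List.append_assoc]

lemma ppsChunks_ne_nil (parts ts : List (List Char)) (h : parts ≠ []) :
    ppsChunks parts ts ≠ [] := by
  cases parts with
  | nil => exact absurd rfl h
  | cons part parts' =>
      simp only [ppsChunks]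
      split <;> simp

-- MAIN: A's whole zip-and-concatenate equals B's chunked double join, up to a single
-- trailing separator ("\n" or "\n\n") that the final strip removes
lemma main_decompose : ∀ (parts ts : List (List Char)), parts ≠ [] → ts ≠ [] →
    ∃ w, (w = pvNL ∨ w = pvNN) ∧
      ((parts.flatMap (fun part => pvSeps (PySem.Chars.splitOn part pvNL))).zip ts).flatMap
          (fun p : List Char × List Char => p.2 ++ p.1)
      = PySem.Chars.join pvNN (ppsChunks parts ts) ++ w := by
  intro parts
  induction parts with
  | nil => intro ts h; exact absurd rfl h
  | cons part parts' ih =>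
      intro ts _ hts
      have hne : PySem.Chars.splitOn part pvNL ≠ [] := splitOn_ne_nil _ _
      have hn : 0 < (PySem.Chars.splitOn part pvNL).length := List.length_pos_iff.mpr hne
      set n := (PySem.Chars.splitOn part pvNL).length with hndef
      have hseps : pvSeps (PySem.Chars.splitOn part pvNL)
          = List.replicate (n - 1) pvNL ++ [pvNN] := rfl
      have hsucc : n - 1 + 1 = n := by omega
      rw [List.flatMap_cons, zip_append_left, List.flatMap_append, pvSeps_length _ hne, hseps]
      rw [seg_spec (n - 1) ts hts, hsucc]
      by_cases hle : ts.length ≤ n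
      · have hdrop : ts.drop n = [] := List.drop_eq_nil_of_le hle
        have hchunks : ppsChunks (part :: parts') ts
            = [PySem.Chars.join pvNL (ts.take n)] := by
          simp only [ppsChunks, ← hndef]
          rw [if_pos hle]
        rw [hdrop, hchunks]
        refine ⟨if n ≤ ts.length then pvNN else pvNL, ?_, ?_⟩
        · split <;> simp
        · simp [PySem.Chars.join, List.intercalate]
      · have hlt : n < ts.length := by omega
        have hn' : n ≤ ts.length := le_of_lt hlt
        have hdropne : ts.drop n ≠ [] := by
          intro hcon
          have := List.drop_eq_nil_iff.mp hcon
          omega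
        cases parts' with
        | nil =>
            have hchunks : ppsChunks [part] ts = [PySem.Chars.join pvNL (ts.take n)] := by
              simp only [ppsChunks, ← hndef]
              split <;> rfl
            rw [hchunks]
            refine ⟨pvNN, Or.inr rfl, ?_⟩
            simp [PySem.Chars.join, List.intercalate, if_pos hn']
        | cons q qs =>
            obtain ⟨w, hw, hG⟩ := ih (ts.drop n) (by simp) hdropne
            have hchunks : ppsChunks (part :: q :: qs) ts
                = PySem.Chars.join pvNL (ts.take n) :: ppsChunks (q :: qs) (ts.drop n) := by
              simp only [ppsChunks, ← hndef]
              rw [if_neg (by omega)]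
            rw [hchunks, hG,
              join_cons_of_ne _ _ _ (ppsChunks_ne_nil (q :: qs) (ts.drop n) (by simp)),
              if_pos hn']
            exact ⟨w, hw, by simp [List.append_assoc]⟩

-- the flattened target-line list is never empty
lemma targetFlat_ne_nil (t : List Char) :
    (PySem.Chars.splitOn t pvNN).flatMap (fun para => PySem.Chars.splitOn para pvNL) ≠ [] := by
  cases hs : PySem.Chars.splitOn t pvNN with
  | nil => exact absurd hs (splitOn_ne_nil _ _)
  | cons p rest =>
      simp only [List.flatMap_cons]
      intro hcon
      exact splitOn_ne_nil p pvNL (by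
        have := List.append_eq_nil_iff.mp hcon
        exact this.1)

-- stripping ignores an all-whitespace suffix
lemma rstrip_append_ws (x w : List Char) (hw : ∀ c ∈ w, PySem.Chars.isspace c = true) :
    PySem.Chars.rstrip (x ++ w) = PySem.Chars.rstrip x := by
  unfold PySem.Chars.rstrip
  rw [List.reverse_append, List.dropWhile_append]
  have hnil : List.dropWhile PySem.Chars.isspace w.reverse = [] := by
    rw [List.dropWhile_eq_nil_iff]
    intro c hc
    exact hw c (List.mem_reverse.mp hc)
  rw [hnil]
  simp

lemma strip_append_ws (x w : List Char) (hw : ∀ c ∈ w, PySem.Chars.isspace c = true) :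
    PySem.Chars.strip (x ++ w) = PySem.Chars.strip x := by
  unfold PySem.Chars.strip PySem.Chars.lstrip
  rw [List.dropWhile_append]
  by_cases hx : (List.dropWhile PySem.Chars.isspace x).isEmpty
  · rw [if_pos hx]
    have hnil : List.dropWhile PySem.Chars.isspace w = [] := by
      rw [List.dropWhile_eq_nil_iff]; exact hw
    rw [hnil, List.isEmpty_iff.mp hx]
  · rw [if_neg hx]
    exact rstrip_append_ws _ _ hw

-- A's separator-building fold is the flatMap of per-paragraph separator lists
lemma sepFold_eq_flatMap (parts : List (List Char)) :
    parts.foldl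
      (fun acc part =>
        (acc ++ List.replicate ((PySem.Chars.splitOn part pvNL).length - 1) pvNL) ++ [pvNN]) [] =
      parts.flatMap (fun part => pvSeps (PySem.Chars.splitOn part pvNL)) := by
  have hfun : (fun (acc : List (List Char)) (part : List Char) =>
        (acc ++ List.replicate ((PySem.Chars.splitOn part pvNL).length - 1) pvNL) ++ [pvNN]) =
      fun acc part => acc ++ pvSeps (PySem.Chars.splitOn part pvNL) := by
    funext acc part
    simp [pvSeps, List.append_assoc]
  rw [hfun, PySem.List.foldl_append_eq_flatMap]
  simp

-- ===== VERDICT (by name: the statement is the Claim_ definition above) =====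
theorem preserve_paragraph_structure_spec : Claim_equal_preserve_paragraph_structure := by
  intro src_text tgt_text _
  unfold Spec_preserve_paragraph_structure preserve_paragraph_structure preserve_paragraph_structure_alt
  dsimp only
  rw [sepFold_eq_flatMap,
      PySem.List.foldl_append_eq_flatMap (fun (p : List Char × List Char) => p.2 ++ p.1)]
  obtain ⟨w, hw, heq⟩ := main_decompose (PySem.Chars.splitOn src_text.toList pvNN)
      ((PySem.Chars.splitOn (PySem.Chars.strip (PySem.Chars.stripChars tgt_text.toList pvBT)) pvNN).flatMap
        (fun para => PySem.Chars.splitOn para pvNL))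
      (splitOn_ne_nil _ _) (targetFlat_ne_nil _)
  rw [heq, List.nil_append,
      strip_append_ws _ w (by
        rcases hw with h | h <;> subst h <;> intro c hc <;>
          simp [pvNL, pvNN] at hc <;> subst hc <;> rfl)]
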